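-- pv_equiv track=rewrite | github.com/MrBrantCode/unitest_baseline | mut_generate/mist_train_cf/cf_18688/solution.py | find_longest_string
-- ===== SOURCE A (Python) =====
-- def find_longest_string(strings):
--     """
--     Finds the longest string that only contains lowercase letters, has no duplicate characters,
--     and in case of a tie, returns the lexicographically smallest string. The function should
--     ignore any strings that contain special characters or numbers and return the result in all
--     lowercase letters.
--     """
--     longest_string = ""
--     longest_length = 0
--
--     for string in strings:
--         # Remove duplicates
--         string = ''.join(dict.fromkeys(string))
--
--         # Ignore special characters and numbers
--         if not string.islower():
--             continue
--
--         # Find the longest string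
--         if len(string) > longest_length:
--             longest_string = string
--             longest_length = len(string)
--         elif len(string) == longest_length:
--             longest_string = min(longest_string, string)
--
--     return longest_string.lower()
-- ===== SOURCE B (Python) =====
-- def find_longest_string(strings):
--     """Same result as A: dedup each string, keep the .islower() ones, then pick
--     the best in one sort instead of a running accumulator."""
--     candidates = [c for c in (''.join(dict.fromkeys(s)) for s in strings) if c.islower()]
--     if not candidates:
--         return ''
--     return sorted(candidates, key=lambda x: (-len(x), x))[0].lower()
-- ===== Notes on version B (the rewrite author's own statement) =====
-- stated objective: alternative
-- what changed: A keeps a running (best, length) accumulator with three comparison branches inside one loop; B first builds the deduplicated .islower() candidate list, then selects the answer by sorting with key (-len, lexicographic) and taking the head.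
import Mathlib
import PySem

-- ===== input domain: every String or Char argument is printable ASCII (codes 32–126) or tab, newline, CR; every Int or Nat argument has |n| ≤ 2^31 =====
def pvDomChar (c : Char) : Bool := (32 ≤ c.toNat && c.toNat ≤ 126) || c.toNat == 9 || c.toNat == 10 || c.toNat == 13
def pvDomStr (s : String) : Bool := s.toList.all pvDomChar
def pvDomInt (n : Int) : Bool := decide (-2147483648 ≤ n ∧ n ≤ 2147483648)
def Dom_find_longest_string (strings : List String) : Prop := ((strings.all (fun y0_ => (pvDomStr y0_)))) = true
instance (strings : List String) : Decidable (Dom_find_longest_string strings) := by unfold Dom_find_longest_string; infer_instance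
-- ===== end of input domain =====

-- B replaces A's running best/length accumulator by filter + sort-and-take-head; same value everywhere.

-- s.islower(), hand-ported (exact on the ASCII domain: cased chars are exactly the
-- ASCII letters there, so islower = some lowercase letter and no uppercase letter)
def pyStrIslower (s : String) : Bool :=
  s.toList.any PySem.Chars.islower && s.toList.all (fun c => !PySem.Chars.isupper c)

-- ===== PORT A =====
-- the loop body of A, verbatim (Python reassigns `string` to its dedup)
def pvAStep (acc : String × Int) (string : String) : String × Int :=
  let string := String.ofList (PySem.List.dedup string.toList)
  if !pyStrIslower string then acc                                       -- continue
  else if PySem.Str.len string > acc.2 then (string, PySem.Str.len string)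
  else if PySem.Str.len string = acc.2 then
    ((if string < acc.1 then string else acc.1), acc.2)                  -- min(longest, string)
  else acc

def find_longest_string (strings : List String) : String :=
  let p := strings.foldl pvAStep ("", 0)
  PySem.Str.lower p.1

-- ===== PORT B =====
def find_longest_string_alt (strings : List String) : String :=
  let candidates := ((strings.map (fun s => String.ofList (PySem.List.dedup s.toList))).filter
      (fun c => pyStrIslower c))
  match PySem.List.sorted2 candidates (fun x => (-(PySem.Str.len x))) (fun x => x) with
  | [] => ""
  | c :: _ => PySem.Str.lower c

-- ===== PRECONDITION & SPEC =====
def Spec_find_longest_string (strings : List String) (out : String) : Prop := out = find_longest_string_alt strings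
instance (strings : List String) (out : String) : Decidable (Spec_find_longest_string strings out) := by unfold Spec_find_longest_string; infer_instance

-- ===== CLAIM (what is proved, stated in full; the proofs are below) =====
def Claim_equal_find_longest_string : Prop := ∀ (strings : List String), Dom_find_longest_string strings → Spec_find_longest_string strings (find_longest_string strings)

-- ===== LEMMAS AND PROOFS =====

def pvLt (a b : String) : Bool :=
  decide ((-(PySem.Str.len a)) < (-(PySem.Str.len b))) ||
    (!decide ((-(PySem.Str.len b)) < (-(PySem.Str.len a))) && decide (a < b))

theorem pvLt_iff (a b : String) :
    pvLt a b = true ↔ (PySem.Str.len b < PySem.Str.len a ∨ (PySem.Str.len a = PySem.Str.len b ∧ a < b)) := by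
  simp only [pvLt, Bool.or_eq_true, Bool.and_eq_true, Bool.not_eq_true', decide_eq_true_iff,
    decide_eq_false_iff_not]
  constructor
  · rintro (h | ⟨h1, h2⟩)
    · left; omega
    · rcases Int.lt_or_le (PySem.Str.len b) (PySem.Str.len a) with h | h
      · exact Or.inl h
      · exact Or.inr ⟨by omega, h2⟩
  · rintro (h | ⟨h1, h2⟩)
    · left; omega
    · exact Or.inr ⟨by omega, h2⟩

theorem pvLt_irrefl (a : String) : pvLt a a = false := by
  cases h : pvLt a a
  · rfl
  · exfalso
    rcases (pvLt_iff a a).1 h with h' | ⟨_, h'⟩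
    · omega
    · exact lt_irrefl _ h'

theorem pvLt_asymm {a b : String} (h : pvLt a b = true) : pvLt b a = false := by
  cases h2 : pvLt b a
  · rfl
  · exfalso
    rcases (pvLt_iff a b).1 h with h' | ⟨he, h'⟩ <;>
      rcases (pvLt_iff b a).1 h2 with h'' | ⟨he2, h''⟩
    · omega
    · omega
    · omega
    · exact lt_irrefl _ (lt_trans h' h'')

theorem pvLt_trans {a b c : String} (h1 : pvLt a b = true) (h2 : pvLt b c = true) :
    pvLt a c = true := by
  rw [pvLt_iff] at h1 h2 ⊢
  rcases h1 with h1 | ⟨e1, l1⟩ <;> rcases h2 with h2 | ⟨e2, l2⟩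
  · left; omega
  · left; omega
  · left; omega
  · exact Or.inr ⟨by omega, lt_trans l1 l2⟩

theorem pvLt_connex {a b : String} (h : a ≠ b) : pvLt a b = true ∨ pvLt b a = true := by
  rw [pvLt_iff, pvLt_iff]
  rcases Int.lt_trichotomy (PySem.Str.len a) (PySem.Str.len b) with hl | hl | hl
  · exact Or.inr (Or.inl hl)
  · rcases lt_or_gt_of_ne h with hs | hs
    · exact Or.inl (Or.inr ⟨hl, hs⟩)
    · exact Or.inr (Or.inr ⟨hl.symm, hs⟩)
  · exact Or.inl (Or.inl hl)

theorem pvCands_len_pos {c : String} (h : pyStrIslower c = true) : 0 < PySem.Str.len c := by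
  unfold pyStrIslower at h
  rw [Bool.and_eq_true, List.any_eq_true] at h
  obtain ⟨⟨x, hx, _⟩, _⟩ := h
  have hne : c.toList ≠ [] := List.ne_nil_of_mem hx
  have : 0 < c.toList.length := List.length_pos_iff.mpr hne
  have hlen : PySem.Str.len c = (c.toList.length : Int) := by simp [PySem.Str.len]
  rw [hlen]
  omega


def pvCands (strings : List String) : List String :=
  (strings.map (fun s => String.ofList (PySem.List.dedup s.toList))).filter (fun c => pyStrIslower c)

theorem foldA_eq (xs : List String) (b : String) :
    xs.foldl pvAStep (b, PySem.Str.len b) =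
    ((pvCands xs).foldl (fun m c => if pvLt c m then c else m) b,
     PySem.Str.len ((pvCands xs).foldl (fun m c => if pvLt c m then c else m) b)) := by
  induction xs generalizing b with
  | nil => simp [pvCands]
  | cons x xs ih =>
    have hcands : pvCands (x :: xs) =
        (if pyStrIslower (String.ofList (PySem.List.dedup x.toList)) then
          [String.ofList (PySem.List.dedup x.toList)] else []) ++ pvCands xs := by
      simp only [pvCands, List.map_cons, List.filter_cons]
      split <;> rfl
    rw [List.foldl_cons, hcands]
    set c := String.ofList (PySem.List.dedup x.toList) with hcdef
    by_cases hc : pyStrIslower c = true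
    · rw [if_pos hc]
      by_cases h1 : PySem.Str.len c > PySem.Str.len b
      · have hlt : pvLt c b = true := (pvLt_iff c b).2 (Or.inl h1)
        have hstep : pvAStep (b, PySem.Str.len b) x = (c, PySem.Str.len c) := by
          simp only [pvAStep, ← hcdef, hc, Bool.not_true, Bool.false_eq_true, if_false, if_pos h1]
        rw [hstep, ih c]
        simp [hlt]
      · by_cases h2 : PySem.Str.len c = PySem.Str.len b
        · by_cases h3 : c < b
          · have hlt : pvLt c b = true := (pvLt_iff c b).2 (Or.inr ⟨h2, h3⟩)
            have hstep : pvAStep (b, PySem.Str.len b) x = (c, PySem.Str.len c) := by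
              simp only [pvAStep, ← hcdef, hc, Bool.not_true, Bool.false_eq_true, if_false,
                if_neg h1, if_pos h2, if_pos h3]
              rw [h2]
            rw [hstep, ih c]
            simp [hlt]
          · have hlt : pvLt c b = false := by
              cases hv : pvLt c b
              · rfl
              · exfalso
                rcases (pvLt_iff c b).1 hv with h' | ⟨_, h'⟩
                · omega
                · exact h3 h'
            have hstep : pvAStep (b, PySem.Str.len b) x = (b, PySem.Str.len b) := by
              simp only [pvAStep, ← hcdef, hc, Bool.not_true, Bool.false_eq_true, if_false,
                if_neg h1, if_pos h2, if_neg h3]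
            rw [hstep, ih b]
            simp [hlt]
        · have hlt : pvLt c b = false := by
            cases hv : pvLt c b
            · rfl
            · exfalso
              rcases (pvLt_iff c b).1 hv with h' | ⟨h', _⟩
              · omega
              · exact h2 h'
          have hstep : pvAStep (b, PySem.Str.len b) x = (b, PySem.Str.len b) := by
            simp only [pvAStep, ← hcdef, hc, Bool.not_true, Bool.false_eq_true, if_false,
              if_neg h1, if_neg h2]
          rw [hstep, ih b]
          simp [hlt]
    · rw [if_neg hc]
      rw [Bool.not_eq_true] at hc
      have hstep : pvAStep (b, PySem.Str.len b) x = (b, PySem.Str.len b) := by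
        simp only [pvAStep, ← hcdef, hc, Bool.not_false, if_true]
      rw [hstep, List.nil_append]
      exact ih b


theorem foldMin_spec (l : List String) (b : String) :
    (l.foldl (fun m c => if pvLt c m then c else m) b = b ∨
       l.foldl (fun m c => if pvLt c m then c else m) b ∈ l) ∧
    ∀ y ∈ b :: l, pvLt y (l.foldl (fun m c => if pvLt c m then c else m) b) = false := by
  induction l generalizing b with
  | nil =>
    refine ⟨Or.inl rfl, ?_⟩
    intro y hy
    simp only [List.mem_singleton] at hy
    subst hy
    exact pvLt_irrefl y
  | cons x t ih =>
    rw [List.foldl_cons]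
    obtain ⟨hmem, hmin⟩ := ih (if pvLt x b then x else b)
    have hba : pvLt (if pvLt x b = true then x else b)
        (List.foldl (fun m c => if pvLt c m = true then c else m)
          (if pvLt x b = true then x else b) t) = false :=
      hmin _ List.mem_cons_self
    constructor
    · rcases hmem with h | h
      · rw [h]
        by_cases hxb : pvLt x b = true
        · rw [if_pos hxb]; exact Or.inr List.mem_cons_self
        · rw [if_neg hxb]; exact Or.inl rfl
      · exact Or.inr (List.mem_cons_of_mem _ h)
    · intro y hy
      set r := List.foldl (fun m c => if pvLt c m = true then c else m)
        (if pvLt x b = true then x else b) t with hr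
      rcases List.mem_cons.1 hy with hz | hy'
      · -- y = b
        by_cases hxb : pvLt x b = true
        · cases hbr : pvLt y r
          · rfl
          · exfalso
            rw [if_pos hxb] at hba
            rw [hz] at hbr
            exact absurd (pvLt_trans hxb hbr) (by rw [hba]; simp)
        · rw [hz]
          have := hmin (if pvLt x b = true then x else b) List.mem_cons_self
          rw [if_neg hxb] at this
          exact this
      · rcases List.mem_cons.1 hy' with hz | hy''
        · -- y = x
          by_cases hxb : pvLt x b = true
          · rw [hz]
            rw [if_pos hxb] at hba
            exact hba
          · cases hxr : pvLt y r
            · rfl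
            · exfalso
              rw [if_neg hxb] at hba
              rw [hz] at hxr
              by_cases hyb : x = b
              · rw [hyb] at hxr; rw [hxr] at hba; simp at hba
              · rcases pvLt_connex hyb with h | h
                · exact absurd h hxb
                · exact absurd (pvLt_trans h hxr) (by rw [hba]; simp)
        · exact hmin y (List.mem_cons_of_mem _ hy'')

theorem insertBy_nil (lt : String → String → Bool) (x : String) :
    PySem.List.insertBy lt x [] = [x] := rfl

theorem insertBy_cons (lt : String → String → Bool) (x a : String) (l : List String) :
    PySem.List.insertBy lt x (a :: l) =
      if lt x a then x :: a :: l else a :: PySem.List.insertBy lt x l := rfl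

theorem sortFold_mem (xs acc : List String) (z : String) :
    z ∈ xs.foldl (fun acc x => PySem.List.insertBy pvLt x acc) acc ↔ (z ∈ xs ∨ z ∈ acc) := by
  induction xs generalizing acc with
  | nil => simp
  | cons x xs ih =>
    rw [List.foldl_cons, ih]
    simp [PySem.List.mem_insertBy]
    tauto

def pvHM (l : List String) : Prop := ∀ h t, l = h :: t → ∀ y ∈ l, pvLt y h = false

theorem insertBy_HM {l : List String} (hl : pvHM l) (x : String) :
    pvHM (PySem.List.insertBy pvLt x l) := by
  cases l with
  | nil =>
    rw [insertBy_nil]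
    intro h t heq y hy
    cases heq
    simp only [List.mem_singleton] at hy
    subst hy
    exact pvLt_irrefl y
  | cons a l' =>
    rw [insertBy_cons]
    by_cases hxa : pvLt x a = true
    · rw [if_pos hxa]
      intro h t heq y hy
      cases heq
      rcases List.mem_cons.1 hy with hz | hy'
      · rw [hz]; exact pvLt_irrefl x
      · rcases List.mem_cons.1 hy' with hz | hy''
        · rw [hz]; exact pvLt_asymm hxa
        · have hya : pvLt y a = false := hl a l' rfl y (List.mem_cons_of_mem _ hy'')
          cases hyx : pvLt y x
          · rfl
          · exact absurd (pvLt_trans hyx hxa) (by rw [hya]; simp)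
    · rw [if_neg hxa]
      intro h t heq y hy
      cases heq
      rcases List.mem_cons.1 hy with hz | hy'
      · rw [hz]; exact pvLt_irrefl a
      · rcases (PySem.List.mem_insertBy pvLt x y _).1 hy' with hz | hy''
        · rw [hz]; exact Bool.not_eq_true _ ▸ (Bool.eq_false_iff.mpr hxa)
        · exact hl a l' rfl y (List.mem_cons_of_mem _ hy'')

theorem sortFold_HM (xs : List String) {acc : List String} (hacc : pvHM acc) :
    pvHM (xs.foldl (fun acc x => PySem.List.insertBy pvLt x acc) acc) := by
  induction xs generalizing acc with
  | nil => exact hacc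
  | cons x xs ih => exact ih (insertBy_HM hacc x)

theorem sorted2_eq_fold (l : List String) :
    PySem.List.sorted2 l (fun x => (-(PySem.Str.len x))) (fun x => x) =
      l.foldl (fun acc x => PySem.List.insertBy pvLt x acc) [] := rfl

-- ===== VERDICT (by name: the statement is the Claim_ definition above) =====
theorem find_longest_string_spec : Claim_equal_find_longest_string := by
  intro strings _
  show find_longest_string strings = find_longest_string_alt strings
  simp only [find_longest_string, find_longest_string_alt]
  rw [show (("", (0:Int)) : String × Int) = ("", PySem.Str.len "") from rfl, foldA_eq]
  rw [show ((strings.map (fun s => String.ofList (PySem.List.dedup s.toList))).filter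
      (fun c => pyStrIslower c)) = pvCands strings from rfl]
  rw [sorted2_eq_fold]
  have hmemfilter : ∀ y ∈ pvCands strings, pyStrIslower y = true := by
    intro y hy
    rw [pvCands] at hy
    exact (List.mem_filter.1 hy).2
  cases hcase : pvCands strings with
  | nil => rfl
  | cons c0 cs =>
    rw [hcase] at hmemfilter
    obtain ⟨hmem, hmin⟩ := foldMin_spec (c0 :: cs) ""
    cases hsf : (c0 :: cs).foldl (fun acc x => PySem.List.insertBy pvLt x acc) [] with
    | nil =>
      exfalso
      have hc0 : c0 ∈ (c0 :: cs).foldl (fun acc x => PySem.List.insertBy pvLt x acc) [] :=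
        (sortFold_mem (c0 :: cs) [] c0).2 (Or.inl List.mem_cons_self)
      rw [hsf] at hc0
      simp at hc0
    | cons h t =>
      have hh_mem : h ∈ c0 :: cs := by
        have hh : h ∈ (c0 :: cs).foldl (fun acc x => PySem.List.insertBy pvLt x acc) [] := by
          rw [hsf]; exact List.mem_cons_self
        rcases (sortFold_mem (c0 :: cs) [] h).1 hh with h' | h'
        · exact h'
        · simp at h'
      have hHM : pvHM ((c0 :: cs).foldl (fun acc x => PySem.List.insertBy pvLt x acc) []) :=
        sortFold_HM (c0 :: cs) (by intro a b hab; simp at hab)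
      have hmin_h : ∀ y ∈ c0 :: cs, pvLt y h = false := by
        intro y hy
        exact hHM h t hsf y (by rw [← hsf] at *; exact (sortFold_mem (c0 :: cs) [] y).2 (Or.inl hy))
      set r := (c0 :: cs).foldl (fun m c => if pvLt c m then c else m) "" with hrdef
      have hr_mem : r ∈ c0 :: cs := by
        rcases hmem with h' | h'
        · exfalso
          have hlt : pvLt c0 "" = true := by
            rw [pvLt_iff]
            left
            have : (0:Int) < PySem.Str.len c0 := pvCands_len_pos (hmemfilter c0 List.mem_cons_self)
            exact this
          have := hmin c0 (List.mem_cons_of_mem _ List.mem_cons_self)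
          rw [h'] at this
          rw [this] at hlt
          simp at hlt
        · exact h'
      have hrh : r = h := by
        by_contra hne
        rcases pvLt_connex hne with hlt | hlt
        · have := hmin_h r hr_mem
          rw [this] at hlt; simp at hlt
        · have := hmin h (List.mem_cons_of_mem _ hh_mem)
          rw [this] at hlt; simp at hlt
      rw [hrh]
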